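-- pv_equiv track=rewrite | github.com/SMAPD-anonymous/S-MAPD | CBS.py | compute_conflict_heuristic
-- ===== SOURCE A (Python) =====
-- def detect_collision(path1, path2):
--     """Return first collision between two paths or None (if no collision)"""
--     def get_location(path, time):
--         if time < 0:
--             return (path[0][0], path[0][1])
--         elif time < len(path):
--             return (path[time][0], path[time][1])
--         else:
--             return None
--
--     def vertex_collision(t):
--         agv_1_curr_loc = get_location(path1, t)
--         agv_2_curr_loc = get_location(path2, t)
--         if agv_1_curr_loc is None or agv_2_curr_loc is None:
--             return None
--         if agv_1_curr_loc == agv_2_curr_loc: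
--             return {'loc': [agv_1_curr_loc], 'timestep': t}
--         return None
--
--     def edge_collision(t):
--         agv_1_prev_loc = get_location(path1, t-1)
--         agv_2_prev_loc = get_location(path2, t-1)
--         agv_1_curr_loc = get_location(path1, t)
--         agv_2_curr_loc = get_location(path2, t)
--         if agv_1_prev_loc is None or agv_2_prev_loc is None or \
--            agv_1_curr_loc is None or agv_2_curr_loc is None:
--             return None
--         if agv_1_prev_loc == agv_2_curr_loc and agv_2_prev_loc == agv_1_curr_loc:
--             return {'loc': [agv_1_prev_loc, agv_1_curr_loc], 'timestep': t}
--         return None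
--
--     if vertex_collision(t = 0) is not None:
--         return vertex_collision(t = 0)
--     for t in range(1, max(len(path1), len(path2))):
--         if vertex_collision(t) is not None:
--             return vertex_collision(t)
--         if edge_collision(t) is not None:
--             return edge_collision(t)
--
--     return None
--
-- def compute_conflict_heuristic(paths):
--     """
--     Compute conflict heuristic h_c (h3 in paper: number of conflict pairs)
--
--     Args:
--         paths: Path dictionary
--
--     Returns:
--         h_c value (number of conflict pairs)
--     """
--     if not paths:
--         return 0
--
--     agv_ids = list(paths.keys())
--     conflict_pairs = 0
--
--     for i in range(len(agv_ids)):
--         for j in range(i+1, len(agv_ids)):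
--             agv1 = agv_ids[i]
--             agv2 = agv_ids[j]
--             if detect_collision(paths[agv1], paths[agv2]) is not None:
--                 conflict_pairs += 1
--
--     return conflict_pairs
-- ===== SOURCE B (Python) =====
-- def compute_conflict_heuristic(paths):
--     """Count conflicting agent pairs by hashing (time, location) and (time, move) events."""
--     vert = {}
--     moves = {}
--     for idx, path in enumerate(paths.values()):
--         for t, loc in enumerate(path):
--             vert[(t, loc)] = vert.get((t, loc), []) + [idx]
--         for t in range(1, len(path)):
--             key = (t, path[t - 1], path[t])
--             moves[key] = moves.get(key, []) + [idx]
--     pairs = set()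
--     for group in vert.values():
--         for x in range(len(group)):
--             for y in range(x + 1, len(group)):
--                 pairs.add((group[x], group[y]))
--     for (t, a, b), group in moves.items():
--         rev = moves.get((t, b, a))
--         if rev is not None:
--             for x in group:
--                 for y in rev:
--                     if x < y:
--                         pairs.add((x, y))
--     return len(pairs)
-- ===== Notes on version B (the rewrite author's own statement) =====
-- stated objective: faster
-- what changed: A tests every agent pair with a per-pair time scan (O(n^2 * L)); B makes one pass over all paths hashing (time,location) and (time,move) events into dicts, then collects the colliding index pairs into a set and returns its size (O(n*L + collisions)).
import Mathlib
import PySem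

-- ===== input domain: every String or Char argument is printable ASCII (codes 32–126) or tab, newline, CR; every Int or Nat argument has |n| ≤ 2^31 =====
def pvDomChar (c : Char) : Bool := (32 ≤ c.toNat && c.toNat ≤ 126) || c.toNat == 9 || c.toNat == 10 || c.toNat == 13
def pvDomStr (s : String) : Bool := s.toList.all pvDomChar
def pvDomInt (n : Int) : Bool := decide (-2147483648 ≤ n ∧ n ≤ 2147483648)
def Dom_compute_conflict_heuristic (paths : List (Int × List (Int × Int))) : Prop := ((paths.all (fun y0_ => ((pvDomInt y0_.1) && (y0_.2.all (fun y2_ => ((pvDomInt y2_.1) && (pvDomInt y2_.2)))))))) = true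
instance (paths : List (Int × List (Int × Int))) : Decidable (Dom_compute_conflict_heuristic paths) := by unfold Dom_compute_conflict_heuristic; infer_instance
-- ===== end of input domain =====

-- B replaces A's pairwise O(n^2*L) scan by hashing per-time vertex/move events and counting the set of colliding index pairs.

-- ===== PORT A =====
-- get_location: the `time < 0` branch indexes path[0] (IndexError = none on an empty path); it is
-- unreachable from A's call sites (t ≥ 0 everywhere), so the Option conflation is harmless.
def pvGetLocation (path : List (Int × Int)) (t : Int) : Option (Int × Int) :=
  if t < 0 then (PySem.List.pyGet? path 0).map (fun l => (l.1, l.2))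
  else if t < (path.length : Int) then (PySem.List.pyGet? path t).map (fun l => (l.1, l.2))
  else none

-- vertex_collision: the returned dict {'loc': [...], 'timestep': t} is modelled as (loc-list, timestep)
def pvVertexColl (p1 p2 : List (Int × Int)) (t : Int) : Option (List (Int × Int) × Int) :=
  match pvGetLocation p1 t, pvGetLocation p2 t with
  | some l1, some l2 => if l1 = l2 then some ([l1], t) else none
  | _, _ => none

def pvEdgeColl (p1 p2 : List (Int × Int)) (t : Int) : Option (List (Int × Int) × Int) :=
  match pvGetLocation p1 (t-1), pvGetLocation p2 (t-1), pvGetLocation p1 t, pvGetLocation p2 t with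
  | some a1p, some a2p, some a1c, some a2c =>
      if a1p = a2c ∧ a2p = a1c then some ([a1p, a1c], t) else none
  | _, _, _, _ => none

def pvDetectLoop (p1 p2 : List (Int × Int)) : List Int → Option (List (Int × Int) × Int)
  | [] => none
  | t :: ts =>
    if (pvVertexColl p1 p2 t).isSome then pvVertexColl p1 p2 t
    else if (pvEdgeColl p1 p2 t).isSome then pvEdgeColl p1 p2 t
    else pvDetectLoop p1 p2 ts

def pvDetectCollision (p1 p2 : List (Int × Int)) : Option (List (Int × Int) × Int) :=
  if (pvVertexColl p1 p2 0).isSome then pvVertexColl p1 p2 0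
  else pvDetectLoop p1 p2 (PySem.List.pyRange 1 (max (p1.length : Int) (p2.length : Int)) 1)

def compute_conflict_heuristic (paths : List (Int × List (Int × Int))) : Int :=
  if paths = [] then 0
  else
    let d := PySem.Dict.mk paths
    let agv_ids := d.keys
    let n : Int := (agv_ids.length : Int)
    (PySem.List.pyRange 0 n 1).foldl (fun c i =>
      (PySem.List.pyRange (i+1) n 1).foldl (fun c j =>
        let agv1 := PySem.List.pyGetD agv_ids i 0
        let agv2 := PySem.List.pyGetD agv_ids j 0
        if (pvDetectCollision (d.getD agv1 []) (d.getD agv2 [])).isSome then c + 1 else c) c) 0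

-- ===== PORT B =====
def compute_conflict_heuristic_alt (paths : List (Int × List (Int × Int))) : Int :=
  let vm := (PySem.List.enumerate (PySem.Dict.mk paths).values).foldl
    (fun (vm : PySem.Dict (Int × Int × Int) (List Int) × PySem.Dict (Int × (Int × Int) × Int × Int) (List Int)) ip =>
      ((PySem.List.enumerate ip.2).foldl
          (fun vert tl => vert.modify (tl.1, tl.2) [] (· ++ [ip.1])) vm.1,
       (PySem.List.pyRange 1 (ip.2.length : Int) 1).foldl
          (fun moves t => moves.modify
            (t, PySem.List.pyGetD ip.2 (t-1) (0,0), PySem.List.pyGetD ip.2 t (0,0)) [] (· ++ [ip.1])) vm.2))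
    (PySem.Dict.empty, PySem.Dict.empty)
  let pairs1 := vm.1.values.foldl (fun s g =>
      (PySem.List.pyRange 0 (g.length : Int) 1).foldl (fun s x =>
        (PySem.List.pyRange (x+1) (g.length : Int) 1).foldl (fun s y =>
          PySem.Set.add s (PySem.List.pyGetD g x 0, PySem.List.pyGetD g y 0)) s) s)
    PySem.Set.empty
  let pairs := vm.2.items.foldl (fun s kg =>
      match vm.2.get? (kg.1.1, kg.1.2.2, kg.1.2.1) with
      | none => s
      | some rev => kg.2.foldl (fun s x =>
          rev.foldl (fun s y => if x < y then PySem.Set.add s (x, y) else s) s) s) pairs1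
  PySem.Set.len pairs

-- ===== PRECONDITION & SPEC =====
-- Pre_ excludes lists whose first components (the dict keys) repeat: a Python dict cannot hold
-- duplicate keys, so such lists do not represent an input of A and their reading is accidental.
def Pre_compute_conflict_heuristic (paths : List (Int × List (Int × Int))) : Prop :=
  (paths.map Prod.fst).Nodup
instance (paths : List (Int × List (Int × Int))) : Decidable (Pre_compute_conflict_heuristic paths) := by
  unfold Pre_compute_conflict_heuristic; infer_instance
def pvWitness_compute_conflict_heuristic : (List (Int × List (Int × Int))) :=
  [(0, [(0, 0), (1, 0)]), (1, [(1, 0), (0, 0)]), (2, [(5, 5)])]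
def Spec_compute_conflict_heuristic (paths : List (Int × List (Int × Int))) (out : Int) : Prop := out = compute_conflict_heuristic_alt paths
instance (paths : List (Int × List (Int × Int))) (out : Int) : Decidable (Spec_compute_conflict_heuristic paths out) := by unfold Spec_compute_conflict_heuristic; infer_instance

-- ===== CLAIM (what is proved, stated in full; the proofs are below) =====
def Claim_equal_compute_conflict_heuristic : Prop := ∀ (paths : List (Int × List (Int × Int))), Dom_compute_conflict_heuristic paths → Pre_compute_conflict_heuristic paths → Spec_compute_conflict_heuristic paths (compute_conflict_heuristic paths)

-- ===== LEMMAS AND PROOFS =====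

-- the collision condition both programs decide, phrased on the two bare paths
def pvColl (p q : List (Int × Int)) : Prop :=
  ∃ t : Nat, t < p.length ∧ t < q.length ∧
    (p.getD t (0,0) = q.getD t (0,0) ∨
     (1 ≤ t ∧ p.getD (t-1) (0,0) = q.getD t (0,0) ∧ q.getD (t-1) (0,0) = p.getD t (0,0)))

def pvCollB (p q : List (Int × Int)) : Bool :=
  (List.range (min p.length q.length)).any (fun t =>
    (p.getD t (0,0) == q.getD t (0,0)) ||
    (decide (1 ≤ t) && (p.getD (t-1) (0,0) == q.getD t (0,0)) &&
      (q.getD (t-1) (0,0) == p.getD t (0,0))))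

theorem pvCollB_iff (p q : List (Int × Int)) : pvCollB p q = true ↔ pvColl p q := by
  unfold pvCollB pvColl
  rw [List.any_eq_true]
  constructor
  · rintro ⟨t, htm, hb⟩
    rw [List.mem_range] at htm
    refine ⟨t, by omega, by omega, ?_⟩
    rcases Bool.or_eq_true_iff.mp hb with h | h
    · exact Or.inl (beq_iff_eq.mp h)
    · rw [Bool.and_eq_true_iff] at h
      obtain ⟨h12, h3⟩ := h
      rw [Bool.and_eq_true_iff] at h12
      exact Or.inr ⟨of_decide_eq_true h12.1, beq_iff_eq.mp h12.2, beq_iff_eq.mp h3⟩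
  · rintro ⟨t, h1, h2, hc⟩
    refine ⟨t, List.mem_range.mpr (by omega), ?_⟩
    rcases hc with h | ⟨h0, ha, hb2⟩
    · exact Bool.or_eq_true_iff.mpr (Or.inl (beq_iff_eq.mpr h))
    · exact Bool.or_eq_true_iff.mpr (Or.inr (by
        rw [Bool.and_eq_true_iff, Bool.and_eq_true_iff]
        exact ⟨⟨decide_eq_true h0, beq_iff_eq.mpr ha⟩, beq_iff_eq.mpr hb2⟩))


theorem getLoc_natCast (p : List (Int × Int)) (t : Nat) :
    pvGetLocation p (t : Int) = if t < p.length then some (p.getD t (0,0)) else none := by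
  unfold pvGetLocation
  rw [if_neg (by omega)]
  by_cases h : t < p.length
  · rw [if_pos (by exact_mod_cast h), if_pos h, PySem.List.pyGet?_natCast,
      List.getElem?_eq_getElem h, List.getD_eq_getElem _ _ h]
    rfl
  · rw [if_neg (by exact_mod_cast h), if_neg h]

theorem vc_isSome (p q : List (Int × Int)) (t : Nat) :
    (pvVertexColl p q (t : Int)).isSome = true ↔
      t < p.length ∧ t < q.length ∧ p.getD t (0,0) = q.getD t (0,0) := by
  unfold pvVertexColl
  rw [getLoc_natCast, getLoc_natCast]
  by_cases h1 : t < p.length <;> by_cases h2 : t < q.length <;>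
    simp [h1, h2]

theorem ec_isSome (p q : List (Int × Int)) (t : Nat) (ht : 1 ≤ t) :
    (pvEdgeColl p q (t : Int)).isSome = true ↔
      t < p.length ∧ t < q.length ∧
        p.getD (t-1) (0,0) = q.getD t (0,0) ∧ q.getD (t-1) (0,0) = p.getD t (0,0) := by
  unfold pvEdgeColl
  have hc : (t : Int) - 1 = ((t - 1 : Nat) : Int) := by omega
  rw [hc, getLoc_natCast, getLoc_natCast, getLoc_natCast, getLoc_natCast]
  by_cases h1 : t < p.length <;> by_cases h2 : t < q.length <;>
    by_cases h3 : t - 1 < p.length <;> by_cases h4 : t - 1 < q.length <;>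
    first
      | (exfalso; omega)
      | simp [h1, h2, h3, h4]

theorem detectLoop_any (p q : List (Int × Int)) (ts : List Int) :
    (pvDetectLoop p q ts).isSome =
      ts.any (fun t => (pvVertexColl p q t).isSome || (pvEdgeColl p q t).isSome) := by
  induction ts with
  | nil => rfl
  | cons t ts ih =>
    rw [pvDetectLoop, List.any_cons]
    split_ifs with h1 h2 <;> simp_all

theorem pv_detect_iff (p q : List (Int × Int)) :
    (pvDetectCollision p q).isSome = true ↔ pvColl p q := by
  unfold pvDetectCollision
  rw [pvColl]
  constructor
  · intro h
    split_ifs at h with h0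
    · have := (vc_isSome p q 0).mp (by exact_mod_cast h0)
      exact ⟨0, this.1, this.2.1, Or.inl this.2.2⟩
    · rw [detectLoop_any, List.any_eq_true] at h
      obtain ⟨t, htmem, hdet⟩ := h
      rw [PySem.List.mem_pyRange_one] at htmem
      obtain ⟨ht1, _⟩ := htmem
      set tn : Nat := t.toNat with htn
      have htcast : (tn : Int) = t := by omega
      rcases Bool.or_eq_true_iff.mp hdet with hv | he
      · have := (vc_isSome p q tn).mp (by rw [htcast]; exact hv)
        exact ⟨tn, this.1, this.2.1, Or.inl this.2.2⟩
      · have := (ec_isSome p q tn (by omega)).mp (by rw [htcast]; exact he)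
        exact ⟨tn, this.1, this.2.1, Or.inr ⟨by omega, this.2.2⟩⟩
  · rintro ⟨t, hp, hq, hcase⟩
    by_cases h0 : (pvVertexColl p q 0).isSome = true
    · rw [if_pos h0]; exact h0
    · rw [if_neg h0, detectLoop_any, List.any_eq_true]
      have ht0 : 1 ≤ t := by
        rcases hcase with hv | he
        · by_contra hlt
          have : t = 0 := by omega
          subst this
          refine h0 ?_
          have : ((0:Nat):Int) = (0:Int) := rfl
          rw [← this]
          exact (vc_isSome p q 0).mpr ⟨hp, hq, hv⟩
        · exact he.1
      refine ⟨(t : Int), ?_, ?_⟩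
      · rw [PySem.List.mem_pyRange_one]
        constructor
        · exact_mod_cast ht0
        · have : (t : Int) < (p.length : Int) := by exact_mod_cast hp
          omega
      · rcases hcase with hv | he
        · exact Bool.or_eq_true_iff.mpr (Or.inl ((vc_isSome p q t).mpr ⟨hp, hq, hv⟩))
        · exact Bool.or_eq_true_iff.mpr (Or.inr ((ec_isSome p q t ht0).mpr ⟨hp, hq, he.2⟩))

theorem detect_isSome_eq (p q : List (Int × Int)) :
    (pvDetectCollision p q).isSome = pvCollB p q := by
  by_cases h : pvColl p q
  · rw [(pvCollB_iff p q).mpr h]; exact (pv_detect_iff p q).mpr h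
  · rw [Bool.eq_false_iff.mpr (fun hc => h ((pvCollB_iff p q).mp hc))]
    exact Bool.eq_false_iff.mpr (fun hc => h ((pv_detect_iff p q).mp hc))

theorem mk_getD_at (paths : List (Int × List (Int × Int)))
    (hnd : (paths.map Prod.fst).Nodup) (i : Nat) (hi : i < paths.length) :
    (PySem.Dict.mk paths).getD ((paths.map Prod.fst).getD i 0) [] =
      (paths.map Prod.snd).getD i [] := by
  induction paths generalizing i with
  | nil => simp at hi
  | cons hd tl ih =>
    obtain ⟨k, v⟩ := hd
    match i with
    | 0 => simp [PySem.Dict.getD, PySem.Dict.get?_mk_cons]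
    | Nat.succ m =>
      have hm : m < tl.length := by simpa using hi
      have hkey : (tl.map Prod.fst).getD m 0 ∈ tl.map Prod.fst := by
        rw [List.getD_eq_getElem _ _ (by simpa using hm)]
        exact List.getElem_mem _
      have hne : k ≠ (tl.map Prod.fst).getD m 0 := by
        intro heq
        rw [List.map_cons, List.nodup_cons] at hnd
        exact hnd.1 (heq ▸ hkey)
      have hnd' : (tl.map Prod.fst).Nodup := by
        rw [List.map_cons, List.nodup_cons] at hnd; exact hnd.2
      have hne' : ¬ (k = (Option.map Prod.fst tl[m]?).getD 0) := by simpa using hne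
      simpa [PySem.Dict.getD, PySem.Dict.get?_mk_cons, hne'] using ih hnd' m hm

theorem filter_range_gt (N i : Nat) :
    (List.range N).filter (fun j => decide (i < j)) =
      (List.range (N - (i+1))).map (fun k => i+1+k) := by
  by_cases hi : i < N
  · have hN : N = (i+1) + (N-(i+1)) := by omega
    conv_lhs => rw [hN, List.range_add]
    rw [List.filter_append]
    have h1 : (List.range (i+1)).filter (fun j => decide (i < j)) = [] :=
      List.filter_eq_nil_iff.mpr (by intro a ha; simp at ha ⊢; omega)
    have h2 : ((List.range (N-(i+1))).map (fun x => (i+1)+x)).filter (fun j => decide (i < j)) =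
        (List.range (N-(i+1))).map (fun x => (i+1)+x) :=
      List.filter_eq_self.mpr (by intro a ha; simp at ha ⊢; obtain ⟨k, hk, rfl⟩ := ha; omega)
    rw [h1, h2, List.nil_append]
  · have h1 : N - (i+1) = 0 := by omega
    rw [h1]
    exact List.filter_eq_nil_iff.mpr (by intro a ha; simp at ha ⊢; omega)

theorem doubleCount (N : Nat) (P : Int → Int → Bool) :
    (PySem.List.pyRange 0 (N : Int) 1).foldl (fun c i =>
        (PySem.List.pyRange (i+1) (N : Int) 1).foldl (fun c j =>
          if P i j then c + 1 else c) c) 0 =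
      ((List.range N).map (fun i =>
        ((List.range (N - (i+1))).countP (fun (k : Nat) => P (i : Int) ((i : Int)+1+(k : Int))) : Int))).sum := by
  have inner : ∀ (i : Nat) (c : Int),
      (PySem.List.pyRange ((i : Int)+1) (N : Int) 1).foldl (fun c j => if P (i : Int) j then c + 1 else c) c
        = c + ((List.range (N - (i+1))).countP (fun (k : Nat) => P (i : Int) ((i : Int)+1+(k : Int))) : Int) := by
    intro i c
    rw [PySem.List.pyRange_one, List.foldl_map]
    have ht : ((N : Int) - ((i : Int)+1)).toNat = N - (i+1) := by omega
    rw [ht, PySem.List.foldl_count_if]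
  calc (PySem.List.pyRange 0 (N : Int) 1).foldl (fun c i =>
        (PySem.List.pyRange (i+1) (N : Int) 1).foldl (fun c j =>
          if P i j then c + 1 else c) c) (0 : Int)
      = ((List.range N).map (fun (k : Nat) => (k : Int))).foldl (fun c i =>
        (PySem.List.pyRange (i+1) (N : Int) 1).foldl (fun c j =>
          if P i j then c + 1 else c) c) (0 : Int) := by rw [PySem.List.pyRange_zero_nat]
    _ = (List.range N).foldl (fun c (i : Nat) =>
        (PySem.List.pyRange ((i : Int)+1) (N : Int) 1).foldl (fun c j =>
          if P (i : Int) j then c + 1 else c) c) (0 : Int) := List.foldl_map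
    _ = (List.range N).foldl (fun c (i : Nat) =>
          c + ((List.range (N - (i+1))).countP (fun (k : Nat) => P (i : Int) ((i : Int)+1+(k : Int))) : Int)) (0 : Int) :=
        PySem.List.foldl_congr_mem' _ _ _ _ (by intro x _ acc; rw [inner])
    _ = _ := by rw [PySem.List.foldl_add]; ring_nf

theorem pv_A_eq (paths : List (Int × List (Int × Int)))
    (hnd : (paths.map Prod.fst).Nodup) :
    compute_conflict_heuristic paths =
      (((List.range paths.length).flatMap (fun i =>
          ((List.range paths.length).filter (fun j => decide (i < j))).map (fun j => (i, j)))).filter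
        (fun ij => pvCollB ((paths.map Prod.snd).getD ij.1 []) ((paths.map Prod.snd).getD ij.2 []))).length := by
  unfold compute_conflict_heuristic
  by_cases h0 : paths = []
  · subst h0; simp
  · rw [if_neg h0]
    have hlen : (PySem.Dict.mk paths).keys.length = paths.length := by
      rw [PySem.Dict.keys_mk, List.length_map]
    simp only [PySem.Dict.keys_mk, List.length_map,
      show (fun (x : Int × List (Int × Int)) => x.1) = (Prod.fst : Int × List (Int × Int) → Int) from rfl]
    rw [doubleCount paths.length (fun i j =>
      (pvDetectCollision
        ((PySem.Dict.mk paths).getD (PySem.List.pyGetD (paths.map Prod.fst) i 0) [])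
        ((PySem.Dict.mk paths).getD (PySem.List.pyGetD (paths.map Prod.fst) j 0) [])).isSome)]
    -- massage the right-hand side into the same sum of counts
    rw [List.filter_flatMap, List.length_flatMap]
    rw [Nat.cast_list_sum, List.map_map]
    congr 1
    apply List.map_congr_left
    intro i hi
    rw [List.mem_range] at hi
    simp only [Function.comp]
    rw [List.filter_map, List.length_map, ← List.countP_eq_length_filter,
      filter_range_gt paths.length i, List.countP_map]
    rw [Nat.cast_inj]
    apply List.countP_congr
    intro k hk
    rw [List.mem_range] at hk
    simp only [Function.comp]
    have hc : ((i : Int) + 1 + (k : Int)) = ((i + 1 + k : Nat) : Int) := by push_cast; ring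
    rw [hc, PySem.List.pyGetD_natCast, PySem.List.pyGetD_natCast,
      mk_getD_at paths hnd i (by omega), mk_getD_at paths hnd (i+1+k) (by omega),
      detect_isSome_eq]

def pvEvsV (ps : List (List (Int × Int))) : List ((Int × Int × Int) × Int) :=
  (PySem.List.enumerate ps).flatMap (fun ip =>
    (PySem.List.enumerate ip.2).map (fun tl => ((tl.1, tl.2), ip.1)))

def pvEvsM (ps : List (List (Int × Int))) : List ((Int × (Int × Int) × Int × Int) × Int) :=
  (PySem.List.enumerate ps).flatMap (fun ip =>
    (PySem.List.pyRange 1 (ip.2.length : Int) 1).map (fun t =>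
      ((t, PySem.List.pyGetD ip.2 (t-1) (0,0), PySem.List.pyGetD ip.2 t (0,0)), ip.1)))

def pvVert (ps : List (List (Int × Int))) : PySem.Dict (Int × Int × Int) (List Int) :=
  (pvEvsV ps).foldl (fun d p => d.modify p.1 [] (· ++ [p.2])) PySem.Dict.empty

def pvMoves (ps : List (List (Int × Int))) : PySem.Dict (Int × (Int × Int) × Int × Int) (List Int) :=
  (pvEvsM ps).foldl (fun d p => d.modify p.1 [] (· ++ [p.2])) PySem.Dict.empty

def pvPairsOf (g : List Int) : List (Int × Int) :=
  (PySem.List.pyRange 0 (g.length : Int) 1).flatMap (fun x =>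
    (PySem.List.pyRange (x+1) (g.length : Int) 1).map (fun y =>
      (PySem.List.pyGetD g x 0, PySem.List.pyGetD g y 0)))

def pvContribM (ps : List (List (Int × Int))) (kg : (Int × (Int × Int) × Int × Int) × List Int) : List (Int × Int) :=
  kg.2.flatMap (fun x =>
    (((pvMoves ps).getD (kg.1.1, kg.1.2.2, kg.1.2.1) []).filter (fun y => decide (x < y))).map (fun y => (x, y)))

theorem prod_foldl {α β γ : Type} (l : List α) (f : β → α → β) (g : γ → α → γ) (b : β) (c : γ) :
    l.foldl (fun p x => (f p.1 x, g p.2 x)) (b, c) = (l.foldl f b, l.foldl g c) := by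
  induction l generalizing b c with
  | nil => rfl
  | cons h t ih => simpa using ih (f b h) (g c h)

theorem foldl_update_flatMap {α β : Type} [BEq α] (l : List β) (F : β → List α) (s : PySem.Set α) :
    l.foldl (fun s x => PySem.Set.update s (F x)) s = PySem.Set.update s (l.flatMap F) := by
  induction l generalizing s with
  | nil => rfl
  | cons h t ih => rw [List.foldl_cons, ih, List.flatMap_cons, PySem.Set.update_append]

theorem foldl_ifadd {α β : Type} [BEq α] (l : List β) (p : β → Prop) [DecidablePred p] (f : β → α) (s : PySem.Set α) :
    l.foldl (fun s y => if p y then PySem.Set.add s (f y) else s) s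
      = PySem.Set.update s ((l.filter (fun y => decide (p y))).map f) := by
  induction l generalizing s with
  | nil => rfl
  | cons h t ih =>
    rw [List.foldl_cons, List.filter_cons]
    by_cases hp : p h
    · rw [if_pos hp, ih]
      have hdp : decide (p h) = true := decide_eq_true hp
      rw [hdp, if_pos rfl, List.map_cons, PySem.Set.update_cons]
    · rw [if_neg hp, ih]
      have hdp : decide (p h) = false := decide_eq_false hp
      rw [hdp]
      simp only [Bool.false_eq_true, if_false]

theorem stepM_eq (ps : List (List (Int × Int))) (s : PySem.Set (Int × Int))
    (kg : (Int × (Int × Int) × Int × Int) × List Int) :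
    (match (pvMoves ps).get? (kg.1.1, kg.1.2.2, kg.1.2.1) with
      | none => s
      | some rev => kg.2.foldl (fun s x =>
          rev.foldl (fun s y => if x < y then PySem.Set.add s (x, y) else s) s) s)
      = PySem.Set.update s (pvContribM ps kg) := by
  cases h : (pvMoves ps).get? (kg.1.1, kg.1.2.2, kg.1.2.1) with
  | none =>
    have hd : (pvMoves ps).getD (kg.1.1, kg.1.2.2, kg.1.2.1) [] = [] := by
      rw [PySem.Dict.getD_eq_get?_getD, h]; rfl
    have h0 : (List.flatMap (fun (x : Int) => (List.map (fun y => (x, y)) (List.filter (fun y => decide (x < y)) ([] : List Int)))) kg.2) = [] := by simp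
    unfold pvContribM
    rw [hd, h0]
    rfl
  | some rev =>
    have hd : (pvMoves ps).getD (kg.1.1, kg.1.2.2, kg.1.2.1) [] = rev := by
      rw [PySem.Dict.getD_eq_get?_getD, h]; rfl
    simp only [foldl_ifadd, foldl_update_flatMap]
    unfold pvContribM
    rw [hd]

theorem pv_B_normal (paths : List (Int × List (Int × Int))) :
    compute_conflict_heuristic_alt paths =
      PySem.Set.len (PySem.Set.update
        (PySem.Set.ofList ((pvVert (paths.map (fun x => x.2))).values.flatMap pvPairsOf))
        ((pvMoves (paths.map (fun x => x.2))).items.flatMap (pvContribM (paths.map (fun x => x.2))))) := by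
  simp only [compute_conflict_heuristic_alt]
  rw [PySem.Dict.values_mk]
  have hvm : (PySem.List.enumerate (paths.map (fun x => x.2))).foldl
      (fun (vm : PySem.Dict (Int × Int × Int) (List Int) × PySem.Dict (Int × (Int × Int) × Int × Int) (List Int)) ip =>
        ((PySem.List.enumerate ip.2).foldl
            (fun vert tl => vert.modify (tl.1, tl.2) [] (· ++ [ip.1])) vm.1,
         (PySem.List.pyRange 1 (ip.2.length : Int) 1).foldl
            (fun moves t => moves.modify
              (t, PySem.List.pyGetD ip.2 (t-1) (0,0), PySem.List.pyGetD ip.2 t (0,0)) [] (· ++ [ip.1])) vm.2))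
      (PySem.Dict.empty, PySem.Dict.empty)
      = (pvVert (paths.map (fun x => x.2)), pvMoves (paths.map (fun x => x.2))) := by
    refine Eq.trans (prod_foldl (PySem.List.enumerate (paths.map (fun x => x.2)))
      (fun d ip => (PySem.List.enumerate ip.2).foldl
          (fun vert tl => vert.modify (tl.1, tl.2) [] (· ++ [ip.1])) d)
      (fun d ip => (PySem.List.pyRange 1 (ip.2.length : Int) 1).foldl
          (fun moves t => moves.modify
            (t, PySem.List.pyGetD ip.2 (t-1) (0,0), PySem.List.pyGetD ip.2 t (0,0)) [] (· ++ [ip.1])) d)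
      PySem.Dict.empty PySem.Dict.empty) ?_
    unfold pvVert pvMoves pvEvsV pvEvsM
    rw [List.foldl_flatMap, List.foldl_flatMap]
    refine Prod.ext ?_ ?_ <;>
      · apply PySem.List.foldl_congr_mem'
        intro x hx acc
        rw [List.foldl_map]
  rw [hvm]
  have hp1 : (pvVert (paths.map (fun x => x.2))).values.foldl (fun s g =>
      (PySem.List.pyRange 0 (g.length : Int) 1).foldl (fun s x =>
        (PySem.List.pyRange (x+1) (g.length : Int) 1).foldl (fun s y =>
          PySem.Set.add s (PySem.List.pyGetD g x 0, PySem.List.pyGetD g y 0)) s) s)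
      PySem.Set.empty
      = PySem.Set.ofList ((pvVert (paths.map (fun x => x.2))).values.flatMap pvPairsOf) := by
    simp only [← PySem.Set.update_map_eq_foldl_add, foldl_update_flatMap]
    rfl
  rw [hp1]
  have hp2 : ∀ (s : PySem.Set (Int × Int)),
      (pvMoves (paths.map (fun x => x.2))).items.foldl (fun s kg =>
        match (pvMoves (paths.map (fun x => x.2))).get? (kg.1.1, kg.1.2.2, kg.1.2.1) with
        | none => s
        | some rev => kg.2.foldl (fun s x =>
            rev.foldl (fun s y => if x < y then PySem.Set.add s (x, y) else s) s) s) s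
      = PySem.Set.update s ((pvMoves (paths.map (fun x => x.2))).items.flatMap
          (pvContribM (paths.map (fun x => x.2)))) := by
    intro s
    rw [← foldl_update_flatMap]
    apply PySem.List.foldl_congr_mem'
    intro kg hkg acc
    exact stepM_eq _ _ _
  rw [hp2]

theorem gV_eq (ps : List (List (Int × Int))) (c : Int × Int × Int) :
    (pvVert ps).getD c [] = ((pvEvsV ps).filter (fun p => p.1 == c)).map (fun p => p.2) := by
  unfold pvVert
  rw [PySem.Dict.getD_foldl_modify_append]
  rw [show (PySem.Dict.empty : PySem.Dict (Int × Int × Int) (List Int)).getD c [] = [] from rfl,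
    List.nil_append]

theorem keys_vert (ps : List (List (Int × Int))) :
    (pvVert ps).keys = PySem.Set.ofList ((pvEvsV ps).map (fun p => p.1)) := by
  unfold pvVert
  rw [PySem.Dict.keys_foldl_modify_key]
  rfl

theorem nodup_keys_vert (ps : List (List (Int × Int))) : (pvVert ps).keys.Nodup := by
  unfold pvVert
  exact PySem.Dict.nodup_keys_foldl_modify_key _ _ _ _ _ List.nodup_nil

theorem mem_evsV (ps : List (List (Int × Int))) (e : (Int × Int × Int) × Int) :
    e ∈ pvEvsV ps ↔ ∃ (a : Nat) (_ : a < ps.length) (t : Nat) (_ : t < (ps.getD a []).length),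
      e = (((t : Int), (ps.getD a []).getD t (0,0)), (a : Int)) := by
  unfold pvEvsV
  simp only [List.mem_flatMap, List.mem_map, PySem.List.mem_enumerate_iff]
  constructor
  · rintro ⟨ip, ⟨a, ha, rfl⟩, tl, ⟨t, ht, rfl⟩, rfl⟩
    have ht2 : t < ps[a].length := ht
    have hgd : ps.getD a [] = ps[a] := List.getD_eq_getElem _ _ ha
    refine ⟨a, ha, t, by rw [hgd]; exact ht2, ?_⟩
    rw [hgd]
    simp [List.getElem?_eq_getElem ht2]
  · rintro ⟨a, ha, t, ht, rfl⟩
    rw [List.getD_eq_getElem _ _ ha] at ht ⊢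
    refine ⟨(0 + (a:Int), ps[a]), ⟨a, ha, rfl⟩, (0 + (t:Int), ps[a][t]), ⟨t, ht, rfl⟩, ?_⟩
    simp [List.getElem?_eq_getElem ht]

theorem mem_gV (ps : List (List (Int × Int))) (c : Int × Int × Int) (i : Int) :
    i ∈ (pvVert ps).getD c [] ↔
      ∃ (a t : Nat), a < ps.length ∧ t < (ps.getD a []).length ∧ i = (a : Int) ∧
        c = ((t : Int), (ps.getD a []).getD t (0,0)) := by
  rw [gV_eq]
  simp only [List.mem_map, List.mem_filter, beq_iff_eq]
  constructor
  · rintro ⟨e, ⟨hmem, hkey⟩, rfl⟩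
    obtain ⟨a, ha, t, ht, rfl⟩ := (mem_evsV ps e).mp hmem
    exact ⟨a, t, ha, ht, rfl, hkey.symm⟩
  · rintro ⟨a, t, ha, ht, rfl, rfl⟩
    exact ⟨(((t : Int), (ps.getD a []).getD t (0,0)), (a : Int)),
      ⟨(mem_evsV ps _).mpr ⟨a, ha, t, ht, rfl⟩, rfl⟩, rfl⟩

theorem sorted_gV (ps : List (List (Int × Int))) (c : Int × Int × Int) :
    ((pvVert ps).getD c []).Pairwise (· < ·) := by
  rw [gV_eq, List.pairwise_map, List.pairwise_filter]
  unfold pvEvsV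
  rw [List.pairwise_flatMap]
  constructor
  · intro ip hip
    rw [List.pairwise_map]
    refine List.Pairwise.imp ?_ (PySem.List.pairwise_lt_enumerate ip.2 0)
    intro tl tl' hlt h1 h2
    exfalso
    rw [beq_iff_eq] at h1 h2
    have : tl.1 = tl'.1 := by
      have e1 : tl.1 = c.1 := congrArg Prod.fst h1
      have e2 : tl'.1 = c.1 := congrArg Prod.fst h2
      omega
    omega
  · refine List.Pairwise.imp ?_ (PySem.List.pairwise_lt_enumerate ps 0)
    intro ip ip' hlt x hx y hy h1 h2
    rw [List.mem_map] at hx hy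
    obtain ⟨tl, _, rfl⟩ := hx
    obtain ⟨tl', _, rfl⟩ := hy
    exact hlt

theorem mem_keys_vert_of_mem (ps : List (List (Int × Int))) (c : Int × Int × Int) (i : Int)
    (h : i ∈ (pvVert ps).getD c []) : c ∈ (pvVert ps).keys := by
  rw [keys_vert, PySem.Set.mem_ofList, List.mem_map]
  rw [gV_eq] at h
  simp only [List.mem_map, List.mem_filter, beq_iff_eq] at h
  obtain ⟨e, ⟨hmem, hkey⟩, _⟩ := h
  exact ⟨e, hmem, hkey⟩

theorem pairsOf_mem (g : List Int) (hs : g.Pairwise (· < ·)) (i j : Int) :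
    (i, j) ∈ pvPairsOf g ↔ i ∈ g ∧ j ∈ g ∧ i < j := by
  unfold pvPairsOf
  simp only [List.mem_flatMap, List.mem_map, PySem.List.mem_pyRange_one]
  have hget := List.pairwise_iff_getElem.mp hs
  constructor
  · rintro ⟨x, ⟨hx0, hxl⟩, y, ⟨hy1, hyl⟩, heq⟩
    have hxn : x.toNat < g.length := by omega
    have hyn : y.toNat < g.length := by omega
    have hxe : PySem.List.pyGetD g x 0 = g[x.toNat] := PySem.List.pyGetD_eq_getElem g 0 hx0 hxl
    have hye : PySem.List.pyGetD g y 0 = g[y.toNat] := PySem.List.pyGetD_eq_getElem g 0 (by omega) hyl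
    rw [Prod.mk.injEq] at heq
    have hi : i = g[x.toNat] := by rw [← hxe, heq.1]
    have hj : j = g[y.toNat] := by rw [← hye, heq.2]
    have hxy : x.toNat < y.toNat := by omega
    subst hi hj
    exact ⟨List.getElem_mem _, List.getElem_mem _, hget _ _ hxn hyn hxy⟩
  · rintro ⟨hi, hj, hij⟩
    obtain ⟨x, hx, rfl⟩ := List.mem_iff_getElem.mp hi
    obtain ⟨y, hy, rfl⟩ := List.mem_iff_getElem.mp hj
    have hxy : x < y := by
      rcases Nat.lt_trichotomy x y with h | h | h
      · exact h
      · subst h; exact absurd hij (lt_irrefl _)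
      · exact absurd (hget _ _ hy hx h) (not_lt.mpr (le_of_lt hij))
    refine ⟨(x : Int), ⟨by omega, by omega⟩, (y : Int), ⟨by omega, by omega⟩, ?_⟩
    rw [PySem.List.pyGetD_natCast, PySem.List.pyGetD_natCast,
      List.getD_eq_getElem _ _ hx, List.getD_eq_getElem _ _ hy]

theorem mem_bigV (ps : List (List (Int × Int))) (i j : Int) :
    (i, j) ∈ (pvVert ps).values.flatMap pvPairsOf ↔
      ∃ a b : Nat, a < b ∧ b < ps.length ∧ i = (a : Int) ∧ j = (b : Int) ∧
        ∃ t : Nat, t < (ps.getD a []).length ∧ t < (ps.getD b []).length ∧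
          (ps.getD a []).getD t (0,0) = (ps.getD b []).getD t (0,0) := by
  rw [PySem.Dict.values_eq_map_keys _ (nodup_keys_vert ps) []]
  simp only [List.mem_flatMap, List.mem_map]
  constructor
  · rintro ⟨g, ⟨c, hc, rfl⟩, hmem⟩
    rw [pairsOf_mem _ (sorted_gV ps c)] at hmem
    obtain ⟨hi, hj, hij⟩ := hmem
    obtain ⟨a, t, ha, ht, rfl, hc1⟩ := (mem_gV ps c i).mp hi
    obtain ⟨b, t', hb, ht', rfl, hc2⟩ := (mem_gV ps c j).mp hj
    have hab : a < b := by exact_mod_cast hij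
    have hcc : ((t:Int), (ps.getD a []).getD t (0,0)) = ((t':Int), (ps.getD b []).getD t' (0,0)) := by
      rw [← hc1, ← hc2]
    rw [Prod.mk.injEq] at hcc
    have htt : t = t' := by exact_mod_cast hcc.1
    subst htt
    exact ⟨a, b, hab, hb, rfl, rfl, t, ht, ht', hcc.2⟩
  · rintro ⟨a, b, hab, hb, rfl, rfl, t, ht, ht', heq⟩
    refine ⟨(pvVert ps).getD ((t:Int), (ps.getD a []).getD t (0,0)) [], ⟨_, ?_, rfl⟩, ?_⟩
    · exact mem_keys_vert_of_mem ps _ _ ((mem_gV ps _ _).mpr ⟨a, t, by omega, ht, rfl, rfl⟩)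
    · rw [pairsOf_mem _ (sorted_gV ps _)]
      exact ⟨(mem_gV ps _ _).mpr ⟨a, t, by omega, ht, rfl, rfl⟩,
        (mem_gV ps _ _).mpr ⟨b, t, hb, ht', rfl, by rw [heq]⟩, by exact_mod_cast hab⟩

theorem gM_eq (ps : List (List (Int × Int))) (c : Int × (Int × Int) × Int × Int) :
    (pvMoves ps).getD c [] = ((pvEvsM ps).filter (fun p => p.1 == c)).map (fun p => p.2) := by
  unfold pvMoves
  rw [PySem.Dict.getD_foldl_modify_append]
  rw [show (PySem.Dict.empty : PySem.Dict (Int × (Int × Int) × Int × Int) (List Int)).getD c [] = []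
      from rfl, List.nil_append]

theorem keys_moves (ps : List (List (Int × Int))) :
    (pvMoves ps).keys = PySem.Set.ofList ((pvEvsM ps).map (fun p => p.1)) := by
  unfold pvMoves
  rw [PySem.Dict.keys_foldl_modify_key]
  rfl

theorem nodup_keys_moves (ps : List (List (Int × Int))) : (pvMoves ps).keys.Nodup := by
  unfold pvMoves
  exact PySem.Dict.nodup_keys_foldl_modify_key _ _ _ _ _ List.nodup_nil

theorem mem_evsM (ps : List (List (Int × Int))) (e : (Int × (Int × Int) × Int × Int) × Int) :
    e ∈ pvEvsM ps ↔ ∃ (a : Nat) (_ : a < ps.length) (t : Nat),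
      1 ≤ t ∧ t < (ps.getD a []).length ∧
      e = (((t : Int), (ps.getD a []).getD (t-1) (0,0), (ps.getD a []).getD t (0,0)), (a : Int)) := by
  unfold pvEvsM
  simp only [List.mem_flatMap, List.mem_map, PySem.List.mem_enumerate_iff,
    PySem.List.mem_pyRange_one]
  constructor
  · rintro ⟨ip, ⟨a, ha, rfl⟩, t, ⟨ht1, htl⟩, rfl⟩
    have hgd : ps.getD a [] = ps[a] := List.getD_eq_getElem _ _ ha
    have htl' : t < ((ps[a] : List (Int × Int)).length : Int) := htl
    refine ⟨a, ha, t.toNat, by omega, by rw [hgd]; omega, ?_⟩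
    have e1 : PySem.List.pyGetD (0 + (a:Int), ps[a]).2 (t-1) (0,0)
        = (ps.getD a []).getD (t.toNat - 1) (0,0) := by
      rw [hgd, show t - 1 = ((t.toNat - 1 : Nat) : Int) from by omega, PySem.List.pyGetD_natCast]
    have e2 : PySem.List.pyGetD (0 + (a:Int), ps[a]).2 t (0,0)
        = (ps.getD a []).getD t.toNat (0,0) := by
      rw [hgd, show t = ((t.toNat : Nat) : Int) from by omega, PySem.List.pyGetD_natCast]
      simp
      congr 2
      omega
    rw [e1, e2]
    rw [show (t : Int) = ((t.toNat : Nat) : Int) from by omega]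
    simp
  · rintro ⟨a, ha, t, ht1, htl, rfl⟩
    have hgd : ps.getD a [] = ps[a] := List.getD_eq_getElem _ _ ha
    rw [hgd] at htl
    refine ⟨(0 + (a:Int), ps[a]), ⟨a, ha, rfl⟩, (t : Int), ⟨by omega, by exact_mod_cast htl⟩, ?_⟩
    have e1 : PySem.List.pyGetD (0 + (a:Int), ps[a]).2 ((t:Int)-1) (0,0)
        = (ps.getD a []).getD (t - 1) (0,0) := by
      rw [hgd, show (t:Int) - 1 = ((t - 1 : Nat) : Int) from by omega, PySem.List.pyGetD_natCast]
    have e2 : PySem.List.pyGetD (0 + (a:Int), ps[a]).2 (t:Int) (0,0)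
        = (ps.getD a []).getD t (0,0) := by
      rw [hgd, PySem.List.pyGetD_natCast]
    rw [e1, e2]
    simp

theorem mem_gM (ps : List (List (Int × Int))) (c : Int × (Int × Int) × Int × Int) (i : Int) :
    i ∈ (pvMoves ps).getD c [] ↔
      ∃ (a t : Nat), a < ps.length ∧ 1 ≤ t ∧ t < (ps.getD a []).length ∧ i = (a : Int) ∧
        c = ((t : Int), (ps.getD a []).getD (t-1) (0,0), (ps.getD a []).getD t (0,0)) := by
  rw [gM_eq]
  simp only [List.mem_map, List.mem_filter, beq_iff_eq]
  constructor
  · rintro ⟨e, ⟨hmem, hkey⟩, rfl⟩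
    obtain ⟨a, ha, t, ht1, htl, rfl⟩ := (mem_evsM ps e).mp hmem
    exact ⟨a, t, ha, ht1, htl, rfl, hkey.symm⟩
  · rintro ⟨a, t, ha, ht1, htl, rfl, rfl⟩
    exact ⟨_, ⟨(mem_evsM ps _).mpr ⟨a, ha, t, ht1, htl, rfl⟩, rfl⟩, rfl⟩

theorem mem_keys_moves_of_mem (ps : List (List (Int × Int))) (c : Int × (Int × Int) × Int × Int)
    (i : Int) (h : i ∈ (pvMoves ps).getD c []) : c ∈ (pvMoves ps).keys := by
  rw [keys_moves, PySem.Set.mem_ofList, List.mem_map]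
  rw [gM_eq] at h
  simp only [List.mem_map, List.mem_filter, beq_iff_eq] at h
  obtain ⟨e, ⟨hmem, hkey⟩, _⟩ := h
  exact ⟨e, hmem, hkey⟩

theorem mem_movesList (ps : List (List (Int × Int))) (i j : Int) :
    (i, j) ∈ (pvMoves ps).items.flatMap (pvContribM ps) ↔
      ∃ a b : Nat, a < b ∧ b < ps.length ∧ i = (a : Int) ∧ j = (b : Int) ∧
        ∃ t : Nat, 1 ≤ t ∧ t < (ps.getD a []).length ∧ t < (ps.getD b []).length ∧
          (ps.getD a []).getD (t-1) (0,0) = (ps.getD b []).getD t (0,0) ∧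
          (ps.getD b []).getD (t-1) (0,0) = (ps.getD a []).getD t (0,0) := by
  rw [PySem.Dict.items_eq_map_keys _ (nodup_keys_moves ps) []]
  simp only [List.mem_flatMap, List.mem_map]
  constructor
  · rintro ⟨kg, ⟨k, hk, rfl⟩, hmem⟩
    unfold pvContribM at hmem
    simp only [List.mem_flatMap, List.mem_map, List.mem_filter, decide_eq_true_eq] at hmem
    obtain ⟨x, hx, y, ⟨hymem, hxy⟩, heq⟩ := hmem
    rw [Prod.mk.injEq] at heq
    obtain ⟨rfl, rfl⟩ := heq
    obtain ⟨a, t, ha, ht1, hta, rfl, hkA⟩ := (mem_gM ps k x).mp hx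
    obtain ⟨b, t', hb, ht1', htb, rfl, hkB⟩ := (mem_gM ps _ y).mp hymem
    subst hkA
    rw [Prod.mk.injEq, Prod.mk.injEq] at hkB
    have htt : t = t' := by
      have := hkB.1
      omega
    subst htt
    refine ⟨a, b, by exact_mod_cast hxy, hb, rfl, rfl, t, ht1, hta, htb, ?_, ?_⟩
    · exact hkB.2.2
    · exact hkB.2.1.symm
  · rintro ⟨a, b, hab, hb, rfl, rfl, t, ht1, hta, htb, h1, h2⟩
    have hxk : (a : Int) ∈ (pvMoves ps).getD
        ((t:Int), (ps.getD a []).getD (t-1) (0,0), (ps.getD a []).getD t (0,0)) [] :=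
      (mem_gM ps _ _).mpr ⟨a, t, by omega, ht1, hta, rfl, rfl⟩
    have hkk := mem_keys_moves_of_mem ps _ _ hxk
    refine ⟨_, ⟨_, hkk, rfl⟩, ?_⟩
    unfold pvContribM
    simp only [List.mem_flatMap, List.mem_map, List.mem_filter, decide_eq_true_eq]
    refine ⟨(a:Int), hxk, (b:Int), ⟨?_, by exact_mod_cast hab⟩, rfl⟩
    refine (mem_gM ps _ _).mpr ⟨b, t, by omega, ht1, htb, rfl, ?_⟩
    rw [Prod.mk.injEq, Prod.mk.injEq]
    exact ⟨rfl, h2.symm, h1⟩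

theorem pvColl_split (p q : List (Int × Int)) : pvColl p q ↔
    (∃ t : Nat, t < p.length ∧ t < q.length ∧ p.getD t (0,0) = q.getD t (0,0)) ∨
    (∃ t : Nat, 1 ≤ t ∧ t < p.length ∧ t < q.length ∧
      p.getD (t-1) (0,0) = q.getD t (0,0) ∧ q.getD (t-1) (0,0) = p.getD t (0,0)) := by
  unfold pvColl
  constructor
  · rintro ⟨t, h1, h2, h3 | h4⟩
    exacts [Or.inl ⟨t, h1, h2, h3⟩, Or.inr ⟨t, h4.1, h1, h2, h4.2⟩]
  · rintro (⟨t, h1, h2, h3⟩ | ⟨t, h0, h1, h2, h3, h4⟩)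
    exacts [⟨t, h1, h2, Or.inl h3⟩, ⟨t, h1, h2, Or.inr ⟨h0, h3, h4⟩⟩]

theorem nodup_pairlist (N : Nat) :
    ((List.range N).flatMap (fun i =>
      ((List.range N).filter (fun j => decide (i < j))).map (fun j => (i, j)))).Nodup := by
  rw [List.nodup_flatMap]
  constructor
  · intro i _
    exact ((List.nodup_range).filter _).map (fun a b h => (Prod.mk.injEq .. ▸ h : _ ∧ _).2)
  · refine List.Pairwise.imp ?_ (List.pairwise_lt_range)
    intro a b hab z hz hz'
    rw [List.mem_map] at hz hz'
    obtain ⟨j, _, rfl⟩ := hz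
    obtain ⟨j', _, h⟩ := hz'
    have : a = b := (Prod.mk.injEq .. ▸ h.symm : _ ∧ _).1
    omega

theorem mem_pairlist (N : Nat) (x : Nat × Nat) :
    x ∈ (List.range N).flatMap (fun i =>
      ((List.range N).filter (fun j => decide (i < j))).map (fun j => (i, j))) ↔
      x.1 < x.2 ∧ x.2 < N := by
  obtain ⟨a, b⟩ := x
  simp only [List.mem_flatMap, List.mem_map, List.mem_filter, List.mem_range, decide_eq_true_eq]
  constructor
  · rintro ⟨i, hi, j, ⟨hj, hij⟩, heq⟩
    rw [Prod.mk.injEq] at heq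
    obtain ⟨rfl, rfl⟩ := heq
    exact ⟨hij, hj⟩
  · rintro ⟨hab, hb⟩
    exact ⟨a, by omega, b, ⟨hb, hab⟩, rfl⟩

theorem pv_B_eq (paths : List (Int × List (Int × Int))) :
    compute_conflict_heuristic_alt paths =
      (((List.range paths.length).flatMap (fun i =>
          ((List.range paths.length).filter (fun j => decide (i < j))).map (fun j => (i, j)))).filter
        (fun ij => pvCollB ((paths.map Prod.snd).getD ij.1 []) ((paths.map Prod.snd).getD ij.2 []))).length := by
  rw [pv_B_normal]
  have hps : (paths.map (fun x => x.2)) = paths.map Prod.snd := rfl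
  rw [hps]
  have hlen : (paths.map Prod.snd).length = paths.length := by simp
  have hNodupP : (PySem.Set.update
      (PySem.Set.ofList ((pvVert (paths.map Prod.snd)).values.flatMap pvPairsOf))
      ((pvMoves (paths.map Prod.snd)).items.flatMap (pvContribM (paths.map Prod.snd)))).Nodup :=
    PySem.Set.nodup_update _ _ (PySem.Set.nodup_ofList _)
  have hinj : Function.Injective (fun (ab : Nat × Nat) => (((ab.1 : Nat) : Int), ((ab.2 : Nat) : Int))) := by
    intro a b h
    rw [Prod.mk.injEq] at h
    exact Prod.ext (by exact_mod_cast h.1) (by exact_mod_cast h.2)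
  have hNodupL := ((nodup_pairlist paths.length).filter
    (fun ij => pvCollB ((paths.map Prod.snd).getD ij.1 []) ((paths.map Prod.snd).getD ij.2 []))).map
    (f := fun (ab : Nat × Nat) => (((ab.1 : Nat) : Int), ((ab.2 : Nat) : Int))) hinj
  have hmem : ∀ z : Int × Int, z ∈ (PySem.Set.update
      (PySem.Set.ofList ((pvVert (paths.map Prod.snd)).values.flatMap pvPairsOf))
      ((pvMoves (paths.map Prod.snd)).items.flatMap (pvContribM (paths.map Prod.snd)))) ↔
      z ∈ (((List.range paths.length).flatMap (fun i =>
          ((List.range paths.length).filter (fun j => decide (i < j))).map (fun j => (i, j)))).filter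
        (fun ij => pvCollB ((paths.map Prod.snd).getD ij.1 []) ((paths.map Prod.snd).getD ij.2 []))).map
        (fun (ab : Nat × Nat) => (((ab.1 : Nat) : Int), ((ab.2 : Nat) : Int))) := by
    rintro ⟨i, j⟩
    rw [PySem.Set.mem_update, PySem.Set.mem_ofList, mem_bigV, mem_movesList, List.mem_map]
    constructor
    · rintro (⟨a, b, hab, hb, rfl, rfl, t, ht1, ht2, heq⟩ |
              ⟨a, b, hab, hb, rfl, rfl, t, ht0, ht1, ht2, he1, he2⟩)
      · refine ⟨(a, b), ?_, rfl⟩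
        rw [List.mem_filter]
        exact ⟨(mem_pairlist _ _).mpr ⟨hab, by omega⟩,
          (pvCollB_iff _ _).mpr ((pvColl_split _ _).mpr (Or.inl ⟨t, ht1, ht2, heq⟩))⟩
      · refine ⟨(a, b), ?_, rfl⟩
        rw [List.mem_filter]
        exact ⟨(mem_pairlist _ _).mpr ⟨hab, by omega⟩,
          (pvCollB_iff _ _).mpr ((pvColl_split _ _).mpr (Or.inr ⟨t, ht0, ht1, ht2, he1, he2⟩))⟩
    · rintro ⟨⟨a, b⟩, hmemf, hz⟩
      rw [List.mem_filter] at hmemf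
      obtain ⟨hpl, hpred⟩ := hmemf
      obtain ⟨hab, hb⟩ := (mem_pairlist _ _).mp hpl
      have hcoll := (pvCollB_iff _ _).mp hpred
      rw [Prod.mk.injEq] at hz
      obtain ⟨rfl, rfl⟩ := hz
      rcases (pvColl_split _ _).mp hcoll with ⟨t, ht1, ht2, heq⟩ | ⟨t, ht0, ht1, ht2, he1, he2⟩
      · exact Or.inl ⟨a, b, hab, by omega, rfl, rfl, t, ht1, ht2, heq⟩
      · exact Or.inr ⟨a, b, hab, by omega, rfl, rfl, t, ht0, ht1, ht2, he1, he2⟩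
  have hperm := (List.perm_ext_iff_of_nodup hNodupP hNodupL).mpr hmem
  rw [show ∀ s : PySem.Set (Int × Int), PySem.Set.len s = (s.length : Int) from fun _ => rfl]
  rw [hperm.length_eq, List.length_map]

-- ===== VERDICT (by name: the statement is the Claim_ definition above) =====
theorem compute_conflict_heuristic_spec : Claim_equal_compute_conflict_heuristic := by
  intro paths _ hpre
  unfold Spec_compute_conflict_heuristic
  rw [pv_A_eq paths hpre, pv_B_eq paths]
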